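-- pv_equiv track=rewrite | github.com/andy2167565/leetcode | Medium/2420_find-all-good-indices/find-all-good-indices.py | goodIndices
-- ===== SOURCE A (Python) =====
-- from typing import List
--
-- def goodIndices(nums: List[int], k: int) -> List[int]:
--     n = len(nums)
--     dp1, dp2 = [1] * n, [1] * n
--     for i in range(1, n):
--         if nums[i - 1] >= nums[i]:
--             dp1[i] = dp1[i - 1] + 1
--         if nums[i] >= nums[i - 1]:
--             dp2[i] = dp2[i - 1] + 1
--     return [i for i in range(k, n - k) if dp1[i - 1] >= k and dp2[i + k] >= k]
-- ===== SOURCE B (Python) =====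
-- def goodIndices(nums, k):
--     n = len(nums)
--     if k == 0:
--         return list(range(n))
--     P = [0] * n  # P[t] = number of pairs j in [1, t] with nums[j-1] < nums[j] (breaks of non-increase)
--     Q = [0] * n  # Q[t] = number of pairs j in [1, t] with nums[j] < nums[j-1] (breaks of non-decrease)
--     for j in range(1, n):
--         P[j] = P[j - 1] + (1 if nums[j - 1] < nums[j] else 0)
--         Q[j] = Q[j - 1] + (1 if nums[j] < nums[j - 1] else 0)
--     res = []
--     for i in range(k, n - k):
--         if P[i - 1] == P[i - k] and Q[i + k] == Q[i + 1]:
--             res.append(i)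
--     return res
-- ===== Notes on version B (the rewrite author's own statement) =====
-- stated objective: alternative
-- what changed: Replaced the resetting run-length DP arrays (dp1/dp2 with >=k threshold tests) by prefix sums of adjacent-pair break indicators, deciding each candidate window by an O(1) equality of two prefix-sum values.
-- outside the precondition, e.g. on goodIndices([1, 2], -1): A returns [-1, 0, 1, 2], B raises IndexError; on goodIndices([5], -1): A raises IndexError, B raises IndexError
import Mathlib
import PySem

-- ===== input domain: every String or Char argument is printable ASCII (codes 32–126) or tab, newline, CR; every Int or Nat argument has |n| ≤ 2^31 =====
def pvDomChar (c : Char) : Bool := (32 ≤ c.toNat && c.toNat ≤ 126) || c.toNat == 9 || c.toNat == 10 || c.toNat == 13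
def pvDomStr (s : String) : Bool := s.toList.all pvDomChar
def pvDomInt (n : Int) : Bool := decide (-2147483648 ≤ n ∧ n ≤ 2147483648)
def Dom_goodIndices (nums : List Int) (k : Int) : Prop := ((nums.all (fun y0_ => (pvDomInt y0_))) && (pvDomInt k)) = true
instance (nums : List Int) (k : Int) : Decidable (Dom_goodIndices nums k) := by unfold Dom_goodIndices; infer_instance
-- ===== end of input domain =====

-- B replaces A's resetting run-length DP arrays by prefix sums of adjacent-pair break
-- indicators, answering each window test by one prefix-sum equality (objective: alternative).

-- ===== PORT A =====
def goodIndices (nums : List Int) (k : Int) : List Int :=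
  let n : Int := PySem.List.len nums
  let dps :=
    (PySem.List.pyRange 1 n 1).foldl
      (fun (st : List Int × List Int) i =>
        (if PySem.List.pyGetD nums (i-1) 0 ≥ PySem.List.pyGetD nums i 0 then
            PySem.List.pySetD st.1 i (PySem.List.pyGetD st.1 (i-1) 0 + 1) else st.1,
         if PySem.List.pyGetD nums i 0 ≥ PySem.List.pyGetD nums (i-1) 0 then
            PySem.List.pySetD st.2 i (PySem.List.pyGetD st.2 (i-1) 0 + 1) else st.2))
      (List.replicate nums.length 1, List.replicate nums.length 1)
  (PySem.List.pyRange k (n - k) 1).filter (fun i =>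
    decide (PySem.List.pyGetD dps.1 (i-1) 0 ≥ k) && decide (PySem.List.pyGetD dps.2 (i+k) 0 ≥ k))

-- ===== PORT B =====
def goodIndices_alt (nums : List Int) (k : Int) : List Int :=
  let n : Int := PySem.List.len nums
  if k = 0 then PySem.List.pyRange 0 n 1
  else
    let pq :=
      (PySem.List.pyRange 1 n 1).foldl
        (fun (pq : List Int × List Int) j =>
          (PySem.List.pySetD pq.1 j (PySem.List.pyGetD pq.1 (j-1) 0 +
             (if PySem.List.pyGetD nums (j-1) 0 < PySem.List.pyGetD nums j 0 then 1 else 0)),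
           PySem.List.pySetD pq.2 j (PySem.List.pyGetD pq.2 (j-1) 0 +
             (if PySem.List.pyGetD nums j 0 < PySem.List.pyGetD nums (j-1) 0 then 1 else 0))))
        (List.replicate nums.length 0, List.replicate nums.length 0)
    (PySem.List.pyRange k (n - k) 1).foldl
      (fun acc i =>
        if PySem.List.pyGetD pq.1 (i-1) 0 = PySem.List.pyGetD pq.1 (i-k) 0 ∧
           PySem.List.pyGetD pq.2 (i+k) 0 = PySem.List.pyGetD pq.2 (i+1) 0
        then acc ++ [i] else acc) []

-- ===== PRECONDITION & SPEC =====
-- Pre_ excludes negative k (outside the problem's natural domain of window lengths), where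
-- A's negative-index wraparound returns out-of-range indices or raises IndexError.
def Pre_goodIndices (nums : List Int) (k : Int) : Prop := 0 ≤ k
instance (nums : List Int) (k : Int) : Decidable (Pre_goodIndices nums k) := by
  unfold Pre_goodIndices; infer_instance

def pvWitness_goodIndices : List Int × Int := ([2, 1, 1, 3], 1)

def Spec_goodIndices (nums : List Int) (k : Int) (out : List Int) : Prop := out = goodIndices_alt nums k
instance (nums : List Int) (k : Int) (out : List Int) : Decidable (Spec_goodIndices nums k out) := by unfold Spec_goodIndices; infer_instance

-- ===== CLAIM (what is proved, stated in full; the proofs are below) =====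
def Claim_equal_goodIndices : Prop := ∀ (nums : List Int) (k : Int), Dom_goodIndices nums k → Pre_goodIndices nums k → Spec_goodIndices nums k (goodIndices nums k)

-- ===== LEMMAS AND PROOFS =====

-- run length of a streak of good pairs ending at j (b t = "pair (t-1,t) is good", read at t ≥ 1)
def pvRun (b : Nat → Bool) : Nat → Int
  | 0 => 1
  | j+1 => if b (j+1) then pvRun b j + 1 else 1

-- prefix count of bad pairs among pairs 1..j
def pvPre (b : Nat → Bool) : Nat → Int
  | 0 => 0
  | j+1 => pvPre b j + (if b (j+1) then 0 else 1)

lemma pvRun_succ (b : Nat → Bool) (j : Nat) :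
    pvRun b (j+1) = if b (j+1) then pvRun b j + 1 else 1 := rfl

lemma pvPre_succ (b : Nat → Bool) (j : Nat) :
    pvPre b (j+1) = pvPre b j + (if b (j+1) then 0 else 1) := rfl

lemma pvRun_pos (b : Nat → Bool) (j : Nat) : 1 ≤ pvRun b j := by
  induction j with
  | zero => simp [pvRun]
  | succ j ih => rw [pvRun_succ]; split <;> omega

lemma pvPre_mono (b : Nat → Bool) {a c : Nat} (h : a ≤ c) : pvPre b a ≤ pvPre b c := by
  induction c with
  | zero => have : a = 0 := by omega
            simp [this]
  | succ c ih =>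
    have hstep : pvPre b c ≤ pvPre b (c+1) := by rw [pvPre_succ]; split <;> omega
    rcases Nat.lt_or_ge a (c+1) with h' | h'
    · exact le_trans (ih (by omega)) hstep
    · have : a = c + 1 := by omega
      simp [this]

lemma pvRun_ge_iff (b : Nat → Bool) (m j : Nat) (h1 : 1 ≤ m) (h2 : m ≤ j + 1) :
    ((m : Int) ≤ pvRun b j ↔ pvPre b j = pvPre b (j + 1 - m)) := by
  induction m generalizing j with
  | zero => omega
  | succ m ih =>
    rcases Nat.eq_zero_or_pos m with hm | hm
    · subst hm
      constructor
      · intro _; congr 1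
      · intro _
        have := pvRun_pos b j
        push_cast
        omega
    · -- m ≥ 1, so j ≥ m ≥ 1
      obtain ⟨j', rfl⟩ : ∃ j', j = j' + 1 := ⟨j - 1, by omega⟩
      by_cases hb : b (j' + 1)
      · have hrun : pvRun b (j' + 1) = pvRun b j' + 1 := by rw [pvRun_succ]; simp [hb]
        have hpre : pvPre b (j' + 1) = pvPre b j' := by rw [pvPre_succ]; simp [hb]
        have hiff := ih j' (by omega) (by omega)
        rw [hrun, hpre]
        have harith : j' + 1 + 1 - (m + 1) = j' + 1 - m := by omega
        rw [harith]
        constructor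
        · intro h; exact hiff.1 (by push_cast at h ⊢; omega)
        · intro h; have := hiff.2 h; push_cast; omega
      · have hrun : pvRun b (j' + 1) = 1 := by rw [pvRun_succ]; simp [hb]
        have hpre : pvPre b (j' + 1) = pvPre b j' + 1 := by rw [pvPre_succ]; simp [hb]
        rw [hrun]
        constructor
        · intro h; push_cast at h; omega
        · intro h
          exfalso
          have hle : pvPre b (j' + 1 + 1 - (m + 1)) ≤ pvPre b j' := pvPre_mono b (by omega)
          omega

-- value of cell t of the array built by the loop (cells 1..m written in order, cell 0 untouched)
def pvArrVal (cnd : Int → Prop) [DecidablePred cnd] (upd : Int → Int → Int) (c : Int) : Nat → Int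
  | 0 => c
  | t+1 => if cnd ((t : Int) + 1) then upd (pvArrVal cnd upd c t) ((t : Int) + 1) else c

lemma pvBuild (cnd : Int → Prop) [DecidablePred cnd] (upd : Int → Int → Int) (c : Int)
    (n m : Nat) (hm : m + 1 ≤ n ∨ m = 0) :
    (((List.range m).map (fun (t : Nat) => (1 + (t : Int)))).foldl
        (fun arr j => if cnd j then
            PySem.List.pySetD arr j (upd (PySem.List.pyGetD arr (j-1) 0) j) else arr)
        (List.replicate n c)).length = n ∧
    ∀ t : Nat, t < n →
      (((List.range m).map (fun (t : Nat) => (1 + (t : Int)))).foldl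
        (fun arr j => if cnd j then
            PySem.List.pySetD arr j (upd (PySem.List.pyGetD arr (j-1) 0) j) else arr)
        (List.replicate n c)).getD t 0 = if t ≤ m then pvArrVal cnd upd c t else c := by
  induction m with
  | zero =>
    refine ⟨by simp, fun t ht => ?_⟩
    simp only [List.range_zero, List.map_nil, List.foldl_nil]
    rw [List.getD_eq_getElem?_getD, List.getElem?_replicate, if_pos ht]
    split
    · next h =>
      have h0 : t = 0 := by omega
      subst h0; rfl
    · rfl
  | succ m ih =>
    have hn : m + 2 ≤ n := by omega
    obtain ⟨ihlen, ihval⟩ := ih (by omega)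
    rw [List.range_succ, List.map_append, List.foldl_append]
    set arr' := ((List.range m).map (fun (t : Nat) => (1 + (t : Int)))).foldl
        (fun arr j => if cnd j then
            PySem.List.pySetD arr j (upd (PySem.List.pyGetD arr (j-1) 0) j) else arr)
        (List.replicate n c) with harr'
    simp only [List.map_cons, List.map_nil, List.foldl_cons, List.foldl_nil]
    have hj1 : (1 + (m : Int)) = ((m + 1 : Nat) : Int) := by push_cast; ring
    have hjm : (1 + (m : Int) - 1) = ((m : Nat) : Int) := by omega
    have hget : PySem.List.pyGetD arr' (1 + (m : Int) - 1) 0 = pvArrVal cnd upd c m := by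
      rw [hjm, PySem.List.pyGetD_natCast]
      have := ihval m (by omega)
      simpa using this
    by_cases hc : cnd (1 + (m : Int))
    · rw [if_pos hc, hget, hj1, PySem.List.pySetD_natCast]
      constructor
      · simpa using ihlen
      · intro t ht
        rw [List.getD_eq_getElem?_getD, List.getElem?_set]
        by_cases hteq : t = m + 1
        · subst hteq
          rw [if_pos rfl, if_pos (by omega : m + 1 < arr'.length)]
          have : pvArrVal cnd upd c (m+1) = upd (pvArrVal cnd upd c m) ((m : Int) + 1) := by
            simp only [pvArrVal]
            rw [if_pos (by rw [show ((m:Int)+1) = 1 + (m:Int) by ring]; exact hc)]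
          rw [if_pos (by omega), this]
          simp
        · rw [if_neg (fun h => hteq h.symm), ← List.getD_eq_getElem?_getD]
          rw [ihval t ht]
          by_cases htm : t ≤ m
          · rw [if_pos htm, if_pos (by omega)]
          · rw [if_neg htm, if_neg (by omega)]
    · rw [if_neg hc]
      refine ⟨ihlen, fun t ht => ?_⟩
      rw [ihval t ht]
      by_cases htm : t ≤ m
      · rw [if_pos htm, if_pos (by omega)]
      · by_cases hteq : t = m + 1
        · subst hteq
          rw [if_neg htm, if_pos (by omega)]
          simp only [pvArrVal]
          rw [if_neg (by rw [show ((m:Int)+1) = 1 + (m:Int) by ring]; exact hc)]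
        · rw [if_neg htm, if_neg (by omega)]

-- pair (t-1,t) keeps a non-increasing run alive / a non-decreasing run alive
def pvDown (nums : List Int) (t : Nat) : Bool := decide (nums.getD (t-1) 0 ≥ nums.getD t 0)
def pvUp (nums : List Int) (t : Nat) : Bool := decide (nums.getD t 0 ≥ nums.getD (t-1) 0)

lemma pvCast1 (t : Nat) : ((t : Int) + 1 - 1) = ((t : Nat) : Int) := by omega
lemma pvCast2 (t : Nat) : ((t : Int) + 1) = (((t+1) : Nat) : Int) := by push_cast; ring

lemma bridge_run_down (nums : List Int) (t : Nat) :
    pvArrVal (fun j => PySem.List.pyGetD nums (j-1) 0 ≥ PySem.List.pyGetD nums j 0)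
      (fun prev _ => prev + 1) 1 t = pvRun (pvDown nums) t := by
  induction t with
  | zero => rfl
  | succ t ih =>
    simp only [pvArrVal, pvRun_succ, pvDown]
    rw [pvCast1, pvCast2, PySem.List.pyGetD_natCast, PySem.List.pyGetD_natCast]
    simp [ih]

lemma bridge_run_up (nums : List Int) (t : Nat) :
    pvArrVal (fun j => PySem.List.pyGetD nums j 0 ≥ PySem.List.pyGetD nums (j-1) 0)
      (fun prev _ => prev + 1) 1 t = pvRun (pvUp nums) t := by
  induction t with
  | zero => rfl
  | succ t ih =>
    simp only [pvArrVal, pvRun_succ, pvUp]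
    rw [pvCast1, pvCast2, PySem.List.pyGetD_natCast, PySem.List.pyGetD_natCast]
    simp [ih]

lemma bridge_pre_down (nums : List Int) (t : Nat) :
    pvArrVal (fun _ => True)
      (fun prev j => prev + (if PySem.List.pyGetD nums (j-1) 0 < PySem.List.pyGetD nums j 0 then 1 else 0)) 0 t
      = pvPre (pvDown nums) t := by
  induction t with
  | zero => rfl
  | succ t ih =>
    simp only [pvArrVal, pvPre_succ, pvDown, if_pos trivial]
    rw [pvCast1, pvCast2, PySem.List.pyGetD_natCast, PySem.List.pyGetD_natCast]
    rw [ih]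
    simp only [Nat.add_sub_cancel]
    by_cases h : nums.getD t 0 ≥ nums.getD (t+1) 0
    · rw [if_neg (by omega), if_pos (by simpa using h)]
    · rw [if_pos (by omega), if_neg (by simpa using h)]

lemma bridge_pre_up (nums : List Int) (t : Nat) :
    pvArrVal (fun _ => True)
      (fun prev j => prev + (if PySem.List.pyGetD nums j 0 < PySem.List.pyGetD nums (j-1) 0 then 1 else 0)) 0 t
      = pvPre (pvUp nums) t := by
  induction t with
  | zero => rfl
  | succ t ih =>
    simp only [pvArrVal, pvPre_succ, pvUp, if_pos trivial]
    rw [pvCast1, pvCast2, PySem.List.pyGetD_natCast, PySem.List.pyGetD_natCast]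
    rw [ih]
    simp only [Nat.add_sub_cancel]
    by_cases h : nums.getD (t+1) 0 ≥ nums.getD t 0
    · rw [if_neg (by omega), if_pos (by simpa using h)]
    · rw [if_pos (by omega), if_neg (by simpa using h)]

-- the four arrays built by the loops, as standalone terms
def pvDP1 (nums : List Int) : List Int :=
  ((List.range (nums.length - 1)).map (fun (t : Nat) => (1 + (t : Int)))).foldl
    (fun arr i => if PySem.List.pyGetD nums (i-1) 0 ≥ PySem.List.pyGetD nums i 0
       then PySem.List.pySetD arr i (PySem.List.pyGetD arr (i-1) 0 + 1) else arr)
    (List.replicate nums.length 1)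

def pvDP2 (nums : List Int) : List Int :=
  ((List.range (nums.length - 1)).map (fun (t : Nat) => (1 + (t : Int)))).foldl
    (fun arr i => if PySem.List.pyGetD nums i 0 ≥ PySem.List.pyGetD nums (i-1) 0
       then PySem.List.pySetD arr i (PySem.List.pyGetD arr (i-1) 0 + 1) else arr)
    (List.replicate nums.length 1)

def pvP (nums : List Int) : List Int :=
  ((List.range (nums.length - 1)).map (fun (t : Nat) => (1 + (t : Int)))).foldl
    (fun arr j => PySem.List.pySetD arr j (PySem.List.pyGetD arr (j-1) 0 +
       (if PySem.List.pyGetD nums (j-1) 0 < PySem.List.pyGetD nums j 0 then 1 else 0)))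
    (List.replicate nums.length 0)

def pvQ (nums : List Int) : List Int :=
  ((List.range (nums.length - 1)).map (fun (t : Nat) => (1 + (t : Int)))).foldl
    (fun arr j => PySem.List.pySetD arr j (PySem.List.pyGetD arr (j-1) 0 +
       (if PySem.List.pyGetD nums j 0 < PySem.List.pyGetD nums (j-1) 0 then 1 else 0)))
    (List.replicate nums.length 0)

lemma pvDP1_spec (nums : List Int) :
    (pvDP1 nums).length = nums.length ∧
    ∀ t : Nat, t < nums.length → (pvDP1 nums).getD t 0 = pvRun (pvDown nums) t := by
  have h := pvBuild (fun j => PySem.List.pyGetD nums (j-1) 0 ≥ PySem.List.pyGetD nums j 0)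
      (fun prev _ => prev + 1) 1 nums.length (nums.length - 1) (by omega)
  simp only [] at h
  constructor
  · unfold pvDP1; exact h.1
  · intro t ht
    unfold pvDP1
    rw [h.2 t ht, if_pos (by omega), bridge_run_down]

lemma pvDP2_spec (nums : List Int) :
    (pvDP2 nums).length = nums.length ∧
    ∀ t : Nat, t < nums.length → (pvDP2 nums).getD t 0 = pvRun (pvUp nums) t := by
  have h := pvBuild (fun j => PySem.List.pyGetD nums j 0 ≥ PySem.List.pyGetD nums (j-1) 0)
      (fun prev _ => prev + 1) 1 nums.length (nums.length - 1) (by omega)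
  simp only [] at h
  constructor
  · unfold pvDP2; exact h.1
  · intro t ht
    unfold pvDP2
    rw [h.2 t ht, if_pos (by omega), bridge_run_up]

lemma pvP_spec (nums : List Int) :
    (pvP nums).length = nums.length ∧
    ∀ t : Nat, t < nums.length → (pvP nums).getD t 0 = pvPre (pvDown nums) t := by
  have h := pvBuild (fun _ => True)
      (fun prev j => prev + (if PySem.List.pyGetD nums (j-1) 0 < PySem.List.pyGetD nums j 0 then 1 else 0))
      0 nums.length (nums.length - 1) (by omega)
  simp only [if_pos trivial] at h
  constructor
  · unfold pvP; exact h.1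
  · intro t ht
    unfold pvP
    rw [h.2 t ht, if_pos (by omega), bridge_pre_down]

lemma pvQ_spec (nums : List Int) :
    (pvQ nums).length = nums.length ∧
    ∀ t : Nat, t < nums.length → (pvQ nums).getD t 0 = pvPre (pvUp nums) t := by
  have h := pvBuild (fun _ => True)
      (fun prev j => prev + (if PySem.List.pyGetD nums j 0 < PySem.List.pyGetD nums (j-1) 0 then 1 else 0))
      0 nums.length (nums.length - 1) (by omega)
  simp only [if_pos trivial] at h
  constructor
  · unfold pvQ; exact h.1
  · intro t ht
    unfold pvQ
    rw [h.2 t ht, if_pos (by omega), bridge_pre_up]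

lemma pyGetD_nonneg_of_all (xs : List Int) (i : Int) (h : ∀ x ∈ xs, (0:Int) ≤ x) :
    0 ≤ PySem.List.pyGetD xs i 0 := by
  rcases hx : PySem.List.pyGet? xs i with _ | x
  · simp [PySem.List.pyGetD_of_none xs i 0 hx]
  · have hm := PySem.List.mem_of_pyGet?_eq_some xs hx
    have : PySem.List.pyGetD xs i 0 = x := by simp [PySem.List.pyGetD, hx]
    rw [this]; exact h x hm

lemma pvDP_mem_pos (arr : List Int) (nums : List Int) (run : Nat → Int)
    (hlen : arr.length = nums.length)
    (hval : ∀ t : Nat, t < nums.length → arr.getD t 0 = run t)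
    (hrun : ∀ t, 1 ≤ run t) : ∀ x ∈ arr, (0:Int) ≤ x := by
  intro x hx
  obtain ⟨t, ht, rfl⟩ := List.mem_iff_getElem.mp hx
  have ht' : t < nums.length := by omega
  have : arr.getD t 0 = arr[t] := by
    rw [List.getD_eq_getElem?_getD, List.getElem?_eq_getElem ht]; rfl
  rw [← this, hval t ht']
  have := hrun t
  omega

-- the ports, rewritten into filters over the characterized arrays
lemma goodIndices_eq (nums : List Int) (k : Int) :
    goodIndices nums k = (PySem.List.pyRange k ((nums.length : Int) - k) 1).filter (fun i =>
      decide (PySem.List.pyGetD (pvDP1 nums) (i-1) 0 ≥ k) &&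
      decide (PySem.List.pyGetD (pvDP2 nums) (i+k) 0 ≥ k)) := by
  unfold goodIndices
  simp only [PySem.List.len_eq]
  have hr : PySem.List.pyRange 1 (nums.length : Int) 1
      = (List.range (nums.length - 1)).map (fun (t : Nat) => (1 + (t : Int))) := by
    have ht : (((nums.length : Int) - 1)).toNat = nums.length - 1 := by omega
    rw [PySem.List.pyRange_one, ht]
  simp only [hr]
  rw [PySem.List.foldl_prod_mk
    (f := (fun arr i => if PySem.List.pyGetD nums (i-1) 0 ≥ PySem.List.pyGetD nums i 0
       then PySem.List.pySetD arr i (PySem.List.pyGetD arr (i-1) 0 + 1) else arr))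
    (g := (fun arr i => if PySem.List.pyGetD nums i 0 ≥ PySem.List.pyGetD nums (i-1) 0
       then PySem.List.pySetD arr i (PySem.List.pyGetD arr (i-1) 0 + 1) else arr))]
  rfl

lemma goodIndices_alt_eq (nums : List Int) (k : Int) :
    goodIndices_alt nums k =
      if k = 0 then PySem.List.pyRange 0 (nums.length : Int) 1
      else (PySem.List.pyRange k ((nums.length : Int) - k) 1).filter (fun i =>
        decide (PySem.List.pyGetD (pvP nums) (i-1) 0 = PySem.List.pyGetD (pvP nums) (i-k) 0 ∧
                PySem.List.pyGetD (pvQ nums) (i+k) 0 = PySem.List.pyGetD (pvQ nums) (i+1) 0)) := by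
  unfold goodIndices_alt
  simp only [PySem.List.len_eq]
  by_cases hk : k = 0
  · rw [if_pos hk, if_pos hk]
  · rw [if_neg hk, if_neg hk]
    have hr : PySem.List.pyRange 1 (nums.length : Int) 1
        = (List.range (nums.length - 1)).map (fun (t : Nat) => (1 + (t : Int))) := by
      have ht : (((nums.length : Int) - 1)).toNat = nums.length - 1 := by omega
      rw [PySem.List.pyRange_one, ht]
    simp only [hr]
    rw [PySem.List.foldl_prod_mk
      (f := (fun arr j => PySem.List.pySetD arr j (PySem.List.pyGetD arr (j-1) 0 +
         (if PySem.List.pyGetD nums (j-1) 0 < PySem.List.pyGetD nums j 0 then 1 else 0))))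
      (g := (fun arr j => PySem.List.pySetD arr j (PySem.List.pyGetD arr (j-1) 0 +
         (if PySem.List.pyGetD nums j 0 < PySem.List.pyGetD nums (j-1) 0 then 1 else 0))))]
    rw [PySem.List.foldl_append_ite_eq_filter]
    simp only [List.nil_append]
    rfl

-- ===== VERDICT (by name: the statement is the Claim_ definition above) =====
theorem goodIndices_spec : Claim_equal_goodIndices := by
  intro nums k _ hpre
  unfold Pre_goodIndices at hpre
  unfold Spec_goodIndices
  rw [goodIndices_eq, goodIndices_alt_eq]
  obtain ⟨hl1, hv1⟩ := pvDP1_spec nums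
  obtain ⟨hl2, hv2⟩ := pvDP2_spec nums
  obtain ⟨hlp, hvp⟩ := pvP_spec nums
  obtain ⟨hlq, hvq⟩ := pvQ_spec nums
  by_cases hk : k = 0
  · subst hk
    rw [if_pos rfl, sub_zero]
    apply List.filter_eq_self.mpr
    intro i hi
    have h1 : (0:Int) ≤ PySem.List.pyGetD (pvDP1 nums) (i-1) 0 :=
      pyGetD_nonneg_of_all _ _ (pvDP_mem_pos _ nums _ hl1 hv1 (pvRun_pos _))
    have h2 : (0:Int) ≤ PySem.List.pyGetD (pvDP2 nums) (i+0) 0 :=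
      pyGetD_nonneg_of_all _ _ (pvDP_mem_pos _ nums _ hl2 hv2 (pvRun_pos _))
    simp only [ge_iff_le, Bool.and_eq_true, decide_eq_true_eq]
    exact ⟨h1, h2⟩
  · rw [if_neg hk]
    apply List.filter_congr
    intro i hi
    obtain ⟨hik, hin⟩ := PySem.List.mem_pyRange_one.mp hi
    have hk1 : 1 ≤ k := by omega
    set kN := k.toNat with hkN
    set iN := i.toNat with hiN
    have hk1' : 1 ≤ kN := by omega
    have hki : kN ≤ iN := by omega
    have hikN : iN + kN < nums.length := by omega
    have e1 : i - 1 = ((iN - 1 : Nat) : Int) := by omega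
    have e2 : i + k = ((iN + kN : Nat) : Int) := by omega
    have e3 : i - k = ((iN - kN : Nat) : Int) := by omega
    have e4 : i + 1 = ((iN + 1 : Nat) : Int) := by omega
    have ek : k = ((kN : Nat) : Int) := by omega
    rw [e1, e2, e3, e4]
    simp only [PySem.List.pyGetD_natCast]
    have g1 : (pvDP1 nums).getD (iN - 1) 0 = pvRun (pvDown nums) (iN - 1) := hv1 _ (by omega)
    have g2 : (pvDP2 nums).getD (iN + kN) 0 = pvRun (pvUp nums) (iN + kN) := hv2 _ (by omega)
    have gp1 : (pvP nums).getD (iN - 1) 0 = pvPre (pvDown nums) (iN - 1) := hvp _ (by omega)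
    have gp2 : (pvP nums).getD (iN - kN) 0 = pvPre (pvDown nums) (iN - kN) := hvp _ (by omega)
    have gq1 : (pvQ nums).getD (iN + kN) 0 = pvPre (pvUp nums) (iN + kN) := hvq _ (by omega)
    have gq2 : (pvQ nums).getD (iN + 1) 0 = pvPre (pvUp nums) (iN + 1) := hvq _ (by omega)
    rw [g1, g2, gp1, gp2, gq1, gq2, ek]
    have h1 := pvRun_ge_iff (pvDown nums) kN (iN - 1) hk1' (by omega)
    rw [show iN - 1 + 1 - kN = iN - kN by omega] at h1
    have h2 := pvRun_ge_iff (pvUp nums) kN (iN + kN) hk1' (by omega)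
    rw [show iN + kN + 1 - kN = iN + 1 by omega] at h2
    simp only [ge_iff_le, h1, h2, Bool.decide_and]
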